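-- pv_equiv track=rewrite | github.com/ClarityNLP/ClarityNLP | native_setup/validate_results0.py | _validate_measurement_results
-- ===== SOURCE A (Python) =====
-- _EQ = 'EQUAL'
--
-- _MM = 'MILLIMETERS'
--
-- _MM3 = 'CUBIC_MILLIMETERS'
--
-- def _fields_exist(field_list, row_dict):
--
--     for f in field_list:
--         if f not in row_dict:
--             return False
--     return True
--
-- def _validate_measurement_results(results):
--
--     FIELDS = ['dimension_X', 'dimension_Y', 'dimension_Z', 'condition', 'units']
--
--     EXPECTED_VALUES = set(['13', '1400', '15', '17', '19', '21'])
--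
--     if 6 != len(results):
--         return False
--
--     for result in results:
--
--         if not _fields_exist(FIELDS, result):
--             return False
--
--         x = result['dimension_X']
--         y = result['dimension_Y']
--         z = result['dimension_Z']
--         condition = result['condition']
--         units = result['units']
--
--         if '13' == x:
--             if _EQ != condition or _MM != units:
--                 return False
--             if '13' in EXPECTED_VALUES:
--                 EXPECTED_VALUES.remove('13')
--             else:
--                 return False
--         elif '1400' == x:
--             if _EQ != condition or _MM3 != units:
--                 return False
--             if '1400' in EXPECTED_VALUES:
--                 EXPECTED_VALUES.remove('1400')
--             else:
--                 return False
--         elif '15' == x: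
--             if '16' != y or 'RANGE' != condition or _MM != units:
--                 return False
--             if '15' in EXPECTED_VALUES:
--                 EXPECTED_VALUES.remove('15')
--             else:
--                 return False
--         elif '17' == x:
--             if '18' != y or _EQ != condition or _MM != units:
--                 return False
--             if '17' in EXPECTED_VALUES:
--                 EXPECTED_VALUES.remove('17')
--             else:
--                 return False
--         elif '19' == x:
--             if '20' != y or _EQ != condition or _MM != units:
--                 return False
--             if '19' in EXPECTED_VALUES:
--                 EXPECTED_VALUES.remove('19')
--             else:
--                 return False
--         elif '21' == x:
--             if '22' != y or '23' != z or _EQ != condition or _MM != units: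
--                 return False
--             if '21' in EXPECTED_VALUES:
--                 EXPECTED_VALUES.remove('21')
--             else:
--                 return False
--         else:
--             return False
--
--     return True
-- ===== SOURCE B (Python) =====
-- _EQ = 'EQUAL'
-- _MM = 'MILLIMETERS'
-- _MM3 = 'CUBIC_MILLIMETERS'
--
-- # Staged re-implementation: three separate whole-list passes (shape check,
-- # multiset-of-X check via counts, per-row field expectations) instead of A's
-- # single sequential loop that mutates a remaining-values set.
-- _CHECKS = {
--     '13':   [('condition', _EQ), ('units', _MM)],
--     '1400': [('condition', _EQ), ('units', _MM3)],
--     '15':   [('dimension_Y', '16'), ('condition', 'RANGE'), ('units', _MM)],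
--     '17':   [('dimension_Y', '18'), ('condition', _EQ), ('units', _MM)],
--     '19':   [('dimension_Y', '20'), ('condition', _EQ), ('units', _MM)],
--     '21':   [('dimension_Y', '22'), ('dimension_Z', '23'), ('condition', _EQ), ('units', _MM)],
-- }
--
-- def _validate_measurement_results(results):
--     FIELDS = ['dimension_X', 'dimension_Y', 'dimension_Z', 'condition', 'units']
--     # Stage 1: shape — exactly six rows, each carrying all five fields.
--     if len(results) != 6:
--         return False
--     if not all(all(f in row for f in FIELDS) for row in results):
--         return False
--     # Stage 2: the multiset of dimension_X values is exactly the six expected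
--     # keys (each key once; with six rows that forces every X to be a key).
--     xs = [row['dimension_X'] for row in results]
--     if any(xs.count(k) != 1 for k in _CHECKS):
--         return False
--     # Stage 3: every row meets the field expectations for its X value.
--     return all(all(row[f] == v for f, v in _CHECKS[row['dimension_X']])
--                for row in results)
-- ===== Notes on version B (the rewrite author's own statement) =====
-- stated objective: alternative
-- what changed: Replaces A's single sequential loop (six-way elif chain mutating a remaining-values set row by row) with three independent whole-list passes: a shape pass, a multiset pass checking each expected dimension_X value occurs exactly once via counts, and a per-row expectation-table pass.
import Mathlib
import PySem

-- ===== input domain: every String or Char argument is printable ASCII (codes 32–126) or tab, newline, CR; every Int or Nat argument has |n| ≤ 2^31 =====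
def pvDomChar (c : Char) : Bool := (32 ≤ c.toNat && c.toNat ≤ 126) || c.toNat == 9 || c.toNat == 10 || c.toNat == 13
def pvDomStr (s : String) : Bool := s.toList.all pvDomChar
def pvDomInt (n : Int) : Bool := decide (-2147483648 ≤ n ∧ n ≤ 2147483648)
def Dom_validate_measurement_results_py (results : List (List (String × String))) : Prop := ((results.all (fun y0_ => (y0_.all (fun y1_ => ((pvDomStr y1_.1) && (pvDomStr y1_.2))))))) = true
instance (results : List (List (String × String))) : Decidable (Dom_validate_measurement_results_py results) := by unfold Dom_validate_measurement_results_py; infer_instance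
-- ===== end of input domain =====

-- B replaces A's single sequential loop mutating a remaining-values set by three
-- independent whole-list passes (shape check, multiset-of-X check via counts, per-row table checks).


-- ===== PORT A =====
def pvFIELDS : List String := ["dimension_X", "dimension_Y", "dimension_Z", "condition", "units"]

def pvFieldsExist (field_list : List String) (row : PySem.Dict String String) : Bool :=
  match field_list with
  | [] => true
  | f :: rest => if (row.contains f) = false then false else pvFieldsExist rest row

-- loop body of A; EXPECTED_VALUES.remove is guarded by the 'in' check, so Set.discard is exact there
def pvLoopA (results : List (List (String × String))) (ev : PySem.Set String) : Bool :=
  match results with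
  | [] => true
  | result :: rest =>
    let row : PySem.Dict String String := PySem.Dict.mk result
    if ¬ pvFieldsExist pvFIELDS row then false
    else
      let x := (row.get? "dimension_X").getD ""
      let y := (row.get? "dimension_Y").getD ""
      let z := (row.get? "dimension_Z").getD ""
      let condition := (row.get? "condition").getD ""
      let units := (row.get? "units").getD ""
      if "13" = x then
        if "EQUAL" ≠ condition ∨ "MILLIMETERS" ≠ units then false
        else if PySem.Set.contains ev "13" then pvLoopA rest (PySem.Set.discard ev "13") else false
      else if "1400" = x then
        if "EQUAL" ≠ condition ∨ "CUBIC_MILLIMETERS" ≠ units then false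
        else if PySem.Set.contains ev "1400" then pvLoopA rest (PySem.Set.discard ev "1400") else false
      else if "15" = x then
        if "16" ≠ y ∨ "RANGE" ≠ condition ∨ "MILLIMETERS" ≠ units then false
        else if PySem.Set.contains ev "15" then pvLoopA rest (PySem.Set.discard ev "15") else false
      else if "17" = x then
        if "18" ≠ y ∨ "EQUAL" ≠ condition ∨ "MILLIMETERS" ≠ units then false
        else if PySem.Set.contains ev "17" then pvLoopA rest (PySem.Set.discard ev "17") else false
      else if "19" = x then
        if "20" ≠ y ∨ "EQUAL" ≠ condition ∨ "MILLIMETERS" ≠ units then false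
        else if PySem.Set.contains ev "19" then pvLoopA rest (PySem.Set.discard ev "19") else false
      else if "21" = x then
        if "22" ≠ y ∨ "23" ≠ z ∨ "EQUAL" ≠ condition ∨ "MILLIMETERS" ≠ units then false
        else if PySem.Set.contains ev "21" then pvLoopA rest (PySem.Set.discard ev "21") else false
      else false

def validate_measurement_results_py (results : List (List (String × String))) : Bool :=
  if (6 : Int) ≠ results.length then false
  else pvLoopA results (PySem.Set.ofList ["13", "1400", "15", "17", "19", "21"])

-- ===== PORT B =====

def pvCHECKS : PySem.Dict String (List (String × String)) :=
  PySem.Dict.ofList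
    [("13",   [("condition", "EQUAL"), ("units", "MILLIMETERS")]),
     ("1400", [("condition", "EQUAL"), ("units", "CUBIC_MILLIMETERS")]),
     ("15",   [("dimension_Y", "16"), ("condition", "RANGE"), ("units", "MILLIMETERS")]),
     ("17",   [("dimension_Y", "18"), ("condition", "EQUAL"), ("units", "MILLIMETERS")]),
     ("19",   [("dimension_Y", "20"), ("condition", "EQUAL"), ("units", "MILLIMETERS")]),
     ("21",   [("dimension_Y", "22"), ("dimension_Z", "23"), ("condition", "EQUAL"), ("units", "MILLIMETERS")])]

-- stage 3 body of Source B; after stage 2 every X value is a key of _CHECKS, so the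
-- Python lookup _CHECKS[x] never raises and 'none => false' is unreachable
def pvStage3 (r : List (String × String)) : Bool :=
  match pvCHECKS.get? (((PySem.Dict.mk r).get? "dimension_X").getD "") with
  | none => false
  | some cs => cs.all (fun fv => (((PySem.Dict.mk r).get? fv.1).getD "") == fv.2)

def validate_measurement_results_py_alt (results : List (List (String × String))) : Bool :=
  if results.length ≠ 6 then false
  else if ¬ (results.all (fun row => pvFIELDS.all (fun f => (PySem.Dict.mk row).contains f))) then false
  else
    let xs := results.map (fun row => (((PySem.Dict.mk row) : PySem.Dict String String).get? "dimension_X").getD "")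
    if (pvCHECKS.keys).any (fun k => PySem.List.count xs k ≠ 1) then false
    else results.all pvStage3

-- ===== PRECONDITION & SPEC =====
def Spec_validate_measurement_results_py (results : List (List (String × String))) (out : Bool) : Prop := out = validate_measurement_results_py_alt results
instance (results : List (List (String × String))) (out : Bool) : Decidable (Spec_validate_measurement_results_py results out) := by unfold Spec_validate_measurement_results_py; infer_instance

-- ===== CLAIM (what is proved, stated in full; the proofs are below) =====
def Claim_equal_validate_measurement_results_py : Prop := ∀ (results : List (List (String × String))), Dom_validate_measurement_results_py results → Spec_validate_measurement_results_py results (validate_measurement_results_py results)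

-- ===== LEMMAS AND PROOFS =====

def pvKEYS : List String := ["13", "1400", "15", "17", "19", "21"]

def pvGetX (r : List (String × String)) : String := (((PySem.Dict.mk r) : PySem.Dict String String).get? "dimension_X").getD ""

def pvRowA (r : List (String × String)) : Bool :=
  pvFieldsExist pvFIELDS (PySem.Dict.mk r) && pvStage3 r

-- the duplicate bookkeeping A threads through its loop, isolated
def pvDistinct : List String → PySem.Set String → Bool
  | [], _ => true
  | x :: t, ev => PySem.Set.contains ev x && pvDistinct t (PySem.Set.discard ev x)

lemma pvCHECKS_eq : pvCHECKS = PySem.Dict.mk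
    [("13",   [("condition", "EQUAL"), ("units", "MILLIMETERS")]),
     ("1400", [("condition", "EQUAL"), ("units", "CUBIC_MILLIMETERS")]),
     ("15",   [("dimension_Y", "16"), ("condition", "RANGE"), ("units", "MILLIMETERS")]),
     ("17",   [("dimension_Y", "18"), ("condition", "EQUAL"), ("units", "MILLIMETERS")]),
     ("19",   [("dimension_Y", "20"), ("condition", "EQUAL"), ("units", "MILLIMETERS")]),
     ("21",   [("dimension_Y", "22"), ("dimension_Z", "23"), ("condition", "EQUAL"), ("units", "MILLIMETERS")])] := by decide

lemma pvStage3_mem_keys (r : List (String × String)) (h : pvStage3 r = true) :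
    pvGetX r ∈ pvKEYS := by
  unfold pvStage3 at h
  rw [pvCHECKS_eq] at h
  by_cases h13 : pvGetX r = "13"
  · simp [pvKEYS, h13]
  by_cases h1400 : pvGetX r = "1400"
  · simp [pvKEYS, h1400]
  by_cases h15 : pvGetX r = "15"
  · simp [pvKEYS, h15]
  by_cases h17 : pvGetX r = "17"
  · simp [pvKEYS, h17]
  by_cases h19 : pvGetX r = "19"
  · simp [pvKEYS, h19]
  by_cases h21 : pvGetX r = "21"
  · simp [pvKEYS, h21]
  · exfalso
    have hnil : ∀ y : String,
        (PySem.Dict.mk ([] : List (String × List (String × String)))).get? y = none :=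
      fun _ => rfl
    simp only [pvGetX] at h13 h1400 h15 h17 h19 h21
    simp [PySem.Dict.get?_mk_cons, Ne.symm h13, Ne.symm h1400, Ne.symm h15,
          Ne.symm h17, Ne.symm h19, Ne.symm h21, hnil] at h

-- pvDistinct is exactly 'no duplicates, all still in the set'
lemma pvDistinct_iff (xs : List String) : ∀ (ev : PySem.Set String),
    pvDistinct xs ev = true ↔ xs.Nodup ∧ ∀ x ∈ xs, x ∈ ev := by
  induction xs with
  | nil => intro ev; simp [pvDistinct]
  | cons x t ih =>
    intro ev
    simp only [pvDistinct, Bool.and_eq_true, PySem.Set.contains_iff, ih,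
      List.nodup_cons, List.mem_cons]
    constructor
    · rintro ⟨hx, hnd, hall⟩
      refine ⟨⟨fun hxt => ((PySem.Set.mem_discard ev x x).mp (hall x hxt)).2 rfl, hnd⟩, ?_⟩
      rintro y (rfl | hy)
      · exact hx
      · exact ((PySem.Set.mem_discard ev x y).mp (hall y hy)).1
    · rintro ⟨⟨hxt, hnd⟩, hall⟩
      refine ⟨hall x (Or.inl rfl), hnd, fun y hy => ?_⟩
      exact (PySem.Set.mem_discard ev x y).mpr ⟨hall y (Or.inr hy), fun hyx => hxt (hyx ▸ hy)⟩

-- pigeonhole on six rows: each of the six keys occurring exactly once ↔ the X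
-- values are duplicate-free and all drawn from the six keys
lemma pvCount_iff (xs : List String) (hlen : xs.length = 6) :
    (∀ k ∈ pvKEYS, List.count k xs = 1) ↔ xs.Nodup ∧ ∀ x ∈ xs, x ∈ pvKEYS := by
  have hK : pvKEYS.Nodup := by decide
  have hKlen : pvKEYS.length = 6 := by decide
  constructor
  · intro h
    have hsub : pvKEYS ⊆ xs := fun k hk =>
      List.count_pos_iff.mp (by rw [h k hk]; norm_num)
    have hperm : xs.Perm pvKEYS :=
      ((hK.subperm hsub).perm_of_length_le (by omega)).symm
    exact ⟨hperm.nodup_iff.mpr hK, fun x hx => hperm.mem_iff.mp hx⟩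
  · rintro ⟨hnd, hsub⟩
    have hperm : xs.Perm pvKEYS :=
      (hnd.subperm hsub).perm_of_length_le (by omega)
    intro k hk
    rw [hperm.count_eq k]
    exact List.count_eq_one_of_mem hK hk

lemma pvFieldsExist_eq_all (fs : List String) (row : PySem.Dict String String) :
    pvFieldsExist fs row = fs.all (fun f => row.contains f) := by
  induction fs with
  | nil => rfl
  | cons f rest ih =>
    simp only [pvFieldsExist, List.all_cons]
    cases h : row.contains f <;> simp [ih]

set_option maxRecDepth 4000 in
-- A's loop is the conjunction of the per-row table checks and the distinctness bookkeeping
lemma pvLoopA_char (results : List (List (String × String))) : ∀ (ev : PySem.Set String),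
    pvLoopA results ev = (results.all pvRowA && pvDistinct (results.map pvGetX) ev) := by
  induction results with
  | nil => intro ev; rfl
  | cons r rest ih =>
    intro ev
    by_cases hf : pvFieldsExist pvFIELDS (PySem.Dict.mk r) = true
    · set x := (((PySem.Dict.mk r) : PySem.Dict String String).get? "dimension_X").getD "" with hxdef
      by_cases h13 : x = "13"
      · rw [Bool.eq_iff_iff]
        simp only [pvLoopA, pvDistinct, pvRowA, pvStage3, pvGetX, List.map_cons, List.all_cons,
          ← hxdef, h13, hf, ih, pvCHECKS_eq, PySem.Dict.get?_mk_cons]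
        simp
        tauto
      by_cases h1400 : x = "1400"
      · rw [Bool.eq_iff_iff]
        simp only [pvLoopA, pvDistinct, pvRowA, pvStage3, pvGetX, List.map_cons, List.all_cons,
          ← hxdef, h1400, hf, ih, pvCHECKS_eq, PySem.Dict.get?_mk_cons]
        simp
        tauto
      by_cases h15 : x = "15"
      · rw [Bool.eq_iff_iff]
        simp only [pvLoopA, pvDistinct, pvRowA, pvStage3, pvGetX, List.map_cons, List.all_cons,
          ← hxdef, h15, hf, ih, pvCHECKS_eq, PySem.Dict.get?_mk_cons]
        simp
        tauto
      by_cases h17 : x = "17"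
      · rw [Bool.eq_iff_iff]
        simp only [pvLoopA, pvDistinct, pvRowA, pvStage3, pvGetX, List.map_cons, List.all_cons,
          ← hxdef, h17, hf, ih, pvCHECKS_eq, PySem.Dict.get?_mk_cons]
        simp
        tauto
      by_cases h19 : x = "19"
      · rw [Bool.eq_iff_iff]
        simp only [pvLoopA, pvDistinct, pvRowA, pvStage3, pvGetX, List.map_cons, List.all_cons,
          ← hxdef, h19, hf, ih, pvCHECKS_eq, PySem.Dict.get?_mk_cons]
        simp
        tauto
      by_cases h21 : x = "21"
      · rw [Bool.eq_iff_iff]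
        simp only [pvLoopA, pvDistinct, pvRowA, pvStage3, pvGetX, List.map_cons, List.all_cons,
          ← hxdef, h21, hf, ih, pvCHECKS_eq, PySem.Dict.get?_mk_cons]
        simp
        tauto
      · have hnil : ∀ y : String,
            (PySem.Dict.mk ([] : List (String × List (String × String)))).get? y = none :=
          fun _ => rfl
        rw [Bool.eq_iff_iff]
        simp only [pvLoopA, pvDistinct, pvRowA, pvStage3, pvGetX, List.map_cons, List.all_cons,
          ← hxdef, hf, ih, pvCHECKS_eq, PySem.Dict.get?_mk_cons]
        simp [Ne.symm h13, Ne.symm h1400, Ne.symm h15, Ne.symm h17, Ne.symm h19, Ne.symm h21, hnil]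
    · have hf3 : pvFieldsExist pvFIELDS (PySem.Dict.mk r) = false := by simpa using hf
      simp [pvLoopA, pvRowA, hf3]

theorem pv_top_eq (results : List (List (String × String))) :
    validate_measurement_results_py results = validate_measurement_results_py_alt results := by
  by_cases hlen : results.length = 6
  · have hA : validate_measurement_results_py results
        = pvLoopA results (PySem.Set.ofList ["13", "1400", "15", "17", "19", "21"]) := by
      unfold validate_measurement_results_py
      rw [if_neg (show ¬((6 : Int) ≠ (results.length : Int)) by omega)]
    have hB : validate_measurement_results_py_alt results =
        (if ¬ (results.all (fun row => pvFIELDS.all (fun f => (PySem.Dict.mk row).contains f))) then false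
         else if (pvCHECKS.keys).any (fun k => PySem.List.count (results.map pvGetX) k ≠ 1) then false
         else results.all pvStage3) := by
      unfold validate_measurement_results_py_alt
      rw [if_neg (show ¬(results.length ≠ 6) by omega)]
      rfl
    have hkeys : pvCHECKS.keys = pvKEYS := by decide
    have hxslen : (results.map pvGetX).length = 6 := by simp [hlen]
    rw [hA, hB, pvLoopA_char, Bool.eq_iff_iff]
    by_cases hfields : (results.all fun row => pvFIELDS.all fun f => (PySem.Dict.mk row).contains f) = true
    · rw [if_neg (not_not.mpr hfields)]
      by_cases hcnt : ((pvCHECKS.keys).any fun k => decide (PySem.List.count (results.map pvGetX) k ≠ 1)) = true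
      · rw [if_pos hcnt]
        simp only [Bool.false_eq_true, iff_false, Bool.and_eq_true, List.all_eq_true,
          pvDistinct_iff, not_and]
        intro hall hnd hmem
        rw [hkeys] at hcnt
        simp only [List.any_eq_true, decide_eq_true_eq, PySem.List.count_eq] at hcnt
        obtain ⟨k, hk, hkcnt⟩ := hcnt
        apply hkcnt
        refine (pvCount_iff _ hxslen).mpr ⟨hnd, ?_⟩ k hk
        intro xv hxv
        obtain ⟨r, hr, rfl⟩ := List.mem_map.mp hxv
        have h2 := hall r hr
        simp only [pvRowA, Bool.and_eq_true] at h2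
        exact pvStage3_mem_keys r h2.2
      · rw [if_neg hcnt]
        rw [hkeys] at hcnt
        simp only [List.any_eq_true, decide_eq_true_eq, PySem.List.count_eq,
          not_exists, not_and, not_not] at hcnt
        have hc := (pvCount_iff _ hxslen).mp (fun k hk => hcnt k hk)
        simp only [Bool.and_eq_true, List.all_eq_true, pvDistinct_iff]
        constructor
        · rintro ⟨hall, _⟩ r hr
          have h2 := hall r hr
          simp only [pvRowA, Bool.and_eq_true] at h2
          exact h2.2
        · intro hall
          refine ⟨fun r hr => ?_, hc.1, fun xv hxv => ?_⟩
          · simp only [pvRowA, Bool.and_eq_true]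
            refine ⟨?_, hall r hr⟩
            rw [pvFieldsExist_eq_all]
            simp only [List.all_eq_true] at hfields ⊢
            exact hfields r hr
          · have := hc.2 xv hxv
            simpa [PySem.Set.mem_ofList, pvKEYS] using this
    · rw [if_pos hfields]
      simp only [Bool.false_eq_true, iff_false, Bool.and_eq_true, List.all_eq_true, not_and]
      intro hall _
      apply hfields
      simp only [List.all_eq_true]
      intro r hr
      have h2 := hall r hr
      simp only [pvRowA, Bool.and_eq_true, pvFieldsExist_eq_all] at h2
      simpa using h2.1
  · unfold validate_measurement_results_py validate_measurement_results_py_alt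
    rw [if_pos (show (6 : Int) ≠ (results.length : Int) by omega),
        if_pos (show results.length ≠ 6 by omega)]

-- ===== VERDICT (by name: the statement is the Claim_ definition above) =====
theorem validate_measurement_results_py_spec : Claim_equal_validate_measurement_results_py := by
  intro results _
  unfold Spec_validate_measurement_results_py
  exact pv_top_eq results
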